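-- pv_equiv track=rewrite | github.com/Eugeneowner/Data-Science | HomeWork_4/src/main.py | simplePrimeSearch
-- ===== SOURCE A (Python) =====
-- def simplePrimeSearch(n: int) -> dict[int, bool]:
--     primes = {}
--
--     for number in range(2, n + 1):
--         is_prime = True
--         d = 2
--         while d * d <= number:
--             if number % d == 0:
--                 is_prime = False
--                 break
--             d += 1
--
--         primes[number] = is_prime
--
--     return primes
-- ===== SOURCE B (Python) =====
-- def simplePrimeSearch(n: int) -> dict[int, bool]:
--     # Sieve: mark every proper multiple of every p >= 2 as composite.
--     sieve = [True] * (n + 1)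
--     for p in range(2, n + 1):
--         for m in range(2 * p, n + 1, p):
--             sieve[m] = False
--     return {k: sieve[k] for k in range(2, n + 1)}
-- ===== Notes on version B (the rewrite author's own statement) =====
-- stated objective: faster
-- what changed: Replaced per-number trial division (a while-loop testing divisors up to sqrt for each number) by a sieve that marks all proper multiples of each integer, then reads primality off the table.
import Mathlib
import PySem

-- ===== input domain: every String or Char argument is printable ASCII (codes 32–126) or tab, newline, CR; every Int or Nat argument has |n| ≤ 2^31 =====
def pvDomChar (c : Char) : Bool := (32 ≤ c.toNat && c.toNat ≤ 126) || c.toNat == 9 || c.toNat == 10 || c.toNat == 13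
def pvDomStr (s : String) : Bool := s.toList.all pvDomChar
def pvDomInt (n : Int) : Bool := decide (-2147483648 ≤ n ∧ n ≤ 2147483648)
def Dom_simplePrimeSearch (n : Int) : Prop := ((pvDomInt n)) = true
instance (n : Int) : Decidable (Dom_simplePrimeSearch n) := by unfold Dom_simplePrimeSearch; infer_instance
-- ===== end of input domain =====

-- B replaces A's per-number trial division by a sieve marking the multiples of each integer (measured faster in a timing run).

-- ===== PORT A =====
-- the inner 'while d * d <= number' loop of A
def pvTrial (number d : Int) : Bool :=
  if d * d ≤ number then
    if PySem.Int.mod number d = 0 then false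
    else pvTrial number (d + 1)
  else true
termination_by (number + 1 - d).toNat
decreasing_by
  rename_i h _
  have hd : d ≤ number := by nlinarith [sq_nonneg d]
  omega

def simplePrimeSearch (n : Int) : List (Int × Bool) :=
  ((PySem.List.pyRange 2 (n + 1) 1).foldl
    (fun primes number => primes.insert number (pvTrial number 2))
    PySem.Dict.empty).items

-- ===== PORT B =====
-- inner loop: 'for m in range(2*p, n+1, p): sieve[m] = False' (indices hit are in range, so pySetD is exact)
def pvMark (n p : Int) (s : List Bool) : List Bool :=
  (PySem.List.pyRange (2 * p) (n + 1) p).foldl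
    (fun s m => PySem.List.pySetD s m false) s

def simplePrimeSearch_alt (n : Int) : List (Int × Bool) :=
  let sieve0 := List.replicate (n + 1).toNat true
  let sieve := (PySem.List.pyRange 2 (n + 1) 1).foldl (fun s p => pvMark n p s) sieve0
  -- '{k: sieve[k] for k in range(2, n+1)}' (k is a fresh key each time, so the dict is the list of pairs)
  (PySem.List.pyRange 2 (n + 1) 1).foldl
    (fun acc k => acc ++ [(k, PySem.List.pyGetD sieve k true)]) []

-- ===== PRECONDITION & SPEC =====
def Spec_simplePrimeSearch (n : Int) (out : List (Int × Bool)) : Prop := out = simplePrimeSearch_alt n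
instance (n : Int) (out : List (Int × Bool)) : Decidable (Spec_simplePrimeSearch n out) := by unfold Spec_simplePrimeSearch; infer_instance

-- ===== CLAIM (what is proved, stated in full; the proofs are below) =====
def Claim_equal_simplePrimeSearch : Prop := ∀ (n : Int), Dom_simplePrimeSearch n → Spec_simplePrimeSearch n (simplePrimeSearch n)

-- ===== LEMMAS AND PROOFS =====

-- A's while loop returns true iff no divisor e ≥ d has e*e ≤ number
theorem pvTrial_eq_true_iff (number d : Int) (hd1 : 1 ≤ d) :
    pvTrial number d = true ↔ ∀ e : Int, d ≤ e → e * e ≤ number → ¬ (e ∣ number) := by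
  induction d using pvTrial.induct number with
  | case1 d hle hmod =>
    rw [pvTrial, if_pos hle, if_pos hmod]
    simp only [Bool.false_eq_true, false_iff]
    intro h
    exact h d le_rfl hle ((PySem.Int.mod_eq_zero_iff_dvd number d).mp hmod)
  | case2 d hle hmod ih =>
    rw [pvTrial, if_pos hle, if_neg hmod, ih (by omega)]
    constructor
    · intro h e he hee
      rcases eq_or_lt_of_le he with heq | hlt
      · subst heq
        exact fun hdvd => hmod ((PySem.Int.mod_eq_zero_iff_dvd number d).mpr hdvd)
      · exact h e (by omega) hee
    · intro h e he hee
      exact h e (by omega) hee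
  | case3 d hle =>
    rw [pvTrial, if_neg hle]
    simp only [true_iff]
    intro e he hee _
    push Not at hle
    nlinarith


theorem pvGet_set_ne {s : List Bool} {m i : Int} (v : Bool) (hm : 0 ≤ m) (hi : 0 ≤ i) (hne : i ≠ m) :
    PySem.List.pyGetD (PySem.List.pySetD s m v) i true = PySem.List.pyGetD s i true := by
  rw [PySem.List.pySetD_of_nonneg s v hm, PySem.List.pyGetD_of_nonneg _ _ hi,
      PySem.List.pyGetD_of_nonneg _ _ hi, List.getD_eq_getElem?_getD, List.getD_eq_getElem?_getD,
      List.getElem?_set_ne (by omega)]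

theorem get_foldl_pySetD_not_mem (ms : List Int) (hms : ∀ m ∈ ms, 0 ≤ m) (s : List Bool)
    (i : Int) (hi : 0 ≤ i) (hni : i ∉ ms) :
    PySem.List.pyGetD (ms.foldl (fun s m => PySem.List.pySetD s m false) s) i true
      = PySem.List.pyGetD s i true := by
  induction ms generalizing s with
  | nil => rfl
  | cons m ms ih =>
    simp only [List.foldl_cons]
    rw [ih (fun x hx => hms x (List.mem_cons_of_mem m hx)) _ (fun h => hni (List.mem_cons_of_mem m h))]
    exact pvGet_set_ne false (hms m List.mem_cons_self) hi (fun h => hni (h ▸ List.mem_cons_self))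

theorem length_foldl_pySetD (ms : List Int) (s : List Bool) :
    (ms.foldl (fun s m => PySem.List.pySetD s m false) s).length = s.length := by
  induction ms generalizing s with
  | nil => rfl
  | cons m ms ih => simp [List.foldl_cons, ih, PySem.List.length_pySetD]

theorem get_foldl_pySetD_mem (ms : List Int) (hms : ∀ m ∈ ms, 0 ≤ m) (s : List Bool)
    (i : Int) (hi : 0 ≤ i) (hlt : i < (s.length : Int)) (hin : i ∈ ms) :
    PySem.List.pyGetD (ms.foldl (fun s m => PySem.List.pySetD s m false) s) i true
      = false := by
  induction ms generalizing s with
  | nil => cases hin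
  | cons m ms ih =>
    simp only [List.foldl_cons]
    by_cases hmem : i ∈ ms
    · exact ih (fun x hx => hms x (List.mem_cons_of_mem m hx)) _
        (by rw [PySem.List.length_pySetD]; exact hlt) hmem
    · have him : i = m := by rcases List.mem_cons.mp hin with h | h; exacts [h, absurd h hmem]
      subst him
      rw [get_foldl_pySetD_not_mem ms (fun x hx => hms x (List.mem_cons_of_mem i hx)) _ i hi hmem]
      rw [PySem.List.pySetD_of_nonneg s false hi, PySem.List.pyGetD_of_nonneg _ _ hi,
          List.getD_eq_getElem?_getD, List.getElem?_set_self (by omega)]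
      rfl

theorem range_nonneg {n p : Int} (hp : 2 ≤ p) : ∀ m ∈ PySem.List.pyRange (2 * p) (n + 1) p, 0 ≤ m := by
  intro m hm
  have := (PySem.List.mem_pyRange_iff_of_pos (by omega) m).mp hm
  omega

theorem length_pvMark (n p : Int) (s : List Bool) : (pvMark n p s).length = s.length :=
  length_foldl_pySetD _ s

theorem get_pvMark_not_mem (n p : Int) (hp : 2 ≤ p) (s : List Bool) (i : Int) (hi : 0 ≤ i)
    (hni : i ∉ PySem.List.pyRange (2 * p) (n + 1) p) :
    PySem.List.pyGetD (pvMark n p s) i true = PySem.List.pyGetD s i true :=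
  get_foldl_pySetD_not_mem _ (range_nonneg hp) s i hi hni

theorem get_sieve_false (n : Int) (ps : List Int) (hps : ∀ p ∈ ps, 2 ≤ p) (s : List Bool)
    (i : Int) (hi : 0 ≤ i) (hlt : i < (s.length : Int))
    (hfalse : PySem.List.pyGetD s i true = false) :
    PySem.List.pyGetD (ps.foldl (fun s p => pvMark n p s) s) i true = false := by
  induction ps generalizing s with
  | nil => exact hfalse
  | cons p ps ih =>
    simp only [List.foldl_cons]
    refine ih (fun q hq => hps q (List.mem_cons_of_mem p hq)) _ (by rw [length_pvMark]; exact hlt) ?_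
    by_cases hm : i ∈ PySem.List.pyRange (2 * p) (n + 1) p
    · exact get_foldl_pySetD_mem _ (range_nonneg (hps p List.mem_cons_self)) s i hi hlt hm
    · rw [get_pvMark_not_mem n p (hps p List.mem_cons_self) s i hi hm]; exact hfalse

theorem get_sieve_miss (n : Int) (ps : List Int) (hps : ∀ p ∈ ps, 2 ≤ p) (s : List Bool)
    (i : Int) (hi : 0 ≤ i)
    (hmiss : ∀ p ∈ ps, i ∉ PySem.List.pyRange (2 * p) (n + 1) p) :
    PySem.List.pyGetD (ps.foldl (fun s p => pvMark n p s) s) i true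
      = PySem.List.pyGetD s i true := by
  induction ps generalizing s with
  | nil => rfl
  | cons p ps ih =>
    simp only [List.foldl_cons]
    rw [ih (fun q hq => hps q (List.mem_cons_of_mem p hq)) _
        (fun q hq => hmiss q (List.mem_cons_of_mem p hq)),
      get_pvMark_not_mem n p (hps p List.mem_cons_self) s i hi (hmiss p List.mem_cons_self)]

theorem get_sieve_hit (n : Int) (ps : List Int) (hps : ∀ p ∈ ps, 2 ≤ p) (s : List Bool)
    (i : Int) (hi : 0 ≤ i) (hlt : i < (s.length : Int))
    (hhit : ∃ p ∈ ps, i ∈ PySem.List.pyRange (2 * p) (n + 1) p) :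
    PySem.List.pyGetD (ps.foldl (fun s p => pvMark n p s) s) i true = false := by
  induction ps generalizing s with
  | nil => rcases hhit with ⟨p, hp, _⟩; cases hp
  | cons p ps ih =>
    simp only [List.foldl_cons]
    by_cases hm : i ∈ PySem.List.pyRange (2 * p) (n + 1) p
    · refine get_sieve_false n ps (fun q hq => hps q (List.mem_cons_of_mem p hq)) _ i hi
        (by rw [length_pvMark]; exact hlt) ?_
      exact get_foldl_pySetD_mem _ (range_nonneg (hps p List.mem_cons_self)) s i hi hlt hm
    · rcases hhit with ⟨q, hq, hqi⟩
      rcases List.mem_cons.mp hq with rfl | hq'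
      · exact absurd hqi hm
      · exact ih (fun r hr => hps r (List.mem_cons_of_mem p hr)) _
          (by rw [length_pvMark]; exact hlt) ⟨q, hq', hqi⟩

theorem marked_iff (n k : Int) (h2 : 2 ≤ k) (hk : k ≤ n) :
    (∃ p ∈ PySem.List.pyRange 2 (n + 1) 1,
        k ∈ PySem.List.pyRange (2 * p) (n + 1) p)
      ↔ ∃ d : Int, 2 ≤ d ∧ d * d ≤ k ∧ d ∣ k := by
  constructor
  · rintro ⟨p, hp, hkp⟩
    rw [PySem.List.mem_pyRange_one] at hp
    rw [PySem.List.mem_pyRange_iff_of_pos (by omega)] at hkp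
    obtain ⟨h1, h2', h3⟩ := hkp
    have hpk : p ∣ k := by
      have : p ∣ 2 * p := Dvd.intro 2 (mul_comm p 2)
      have := dvd_add h3 this
      simpa using this
    obtain ⟨c, rfl⟩ := hpk
    have hc2 : 2 ≤ c := by nlinarith
    rcases le_total p c with hpc | hcp
    · exact ⟨p, hp.1, by nlinarith, Dvd.intro c rfl⟩
    · exact ⟨c, hc2, by nlinarith, Dvd.intro p (mul_comm c p)⟩
  · rintro ⟨d, hd2, hdd, c, rfl⟩
    have hdc : d ≤ c := by nlinarith
    refine ⟨d, ?_, ?_⟩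
    · rw [PySem.List.mem_pyRange_one]
      constructor
      · exact hd2
      · nlinarith
    · rw [PySem.List.mem_pyRange_iff_of_pos (by omega)]
      refine ⟨by nlinarith, by omega, ?_⟩
      exact ⟨c - 2, by ring⟩

-- pointwise agreement of the two primality computations
theorem pointwise (n k : Int) (h2 : 2 ≤ k) (hk : k < n + 1) :
    pvTrial k 2
      = PySem.List.pyGetD
          ((PySem.List.pyRange 2 (n + 1) 1).foldl (fun s p => pvMark n p s)
            (List.replicate (n + 1).toNat true)) k true := by
  have hlen : ((List.replicate (n + 1).toNat true).length : Int) = n + 1 := by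
    simp [List.length_replicate]; omega
  have hps : ∀ p ∈ PySem.List.pyRange 2 (n + 1) 1, (2:Int) ≤ p := by
    intro p hp; exact (PySem.List.mem_pyRange_one.mp hp).1
  by_cases hc : ∃ d : Int, 2 ≤ d ∧ d * d ≤ k ∧ d ∣ k
  · rw [get_sieve_hit n _ hps _ k (by omega) (by omega)
        ((marked_iff n k h2 (by omega)).mpr hc)]
    rcases hc with ⟨d, hd2, hdd, hdvd⟩
    have : ¬ (pvTrial k 2 = true) := by
      rw [pvTrial_eq_true_iff k 2 (by omega)]
      intro h
      exact h d (by omega) hdd hdvd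
    simpa using this
  · rw [get_sieve_miss n _ hps _ k (by omega) ?_]
    · rw [(pvTrial_eq_true_iff k 2 (by omega)).mpr ?_]
      · rw [PySem.List.pyGetD_of_nonneg _ _ (by omega : (0:Int) ≤ k),
            List.getD_eq_getElem?_getD, List.getElem?_replicate]
        split <;> rfl
      · intro e he hee hdvd
        exact hc ⟨e, he, hee, hdvd⟩
    · intro p hp hkp
      exact hc ((marked_iff n k h2 (by omega)).mp ⟨p, hp, hkp⟩)

-- ===== VERDICT (by name: the statement is the Claim_ definition above) =====
theorem simplePrimeSearch_spec : Claim_equal_simplePrimeSearch := by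
  intro n _
  unfold Spec_simplePrimeSearch simplePrimeSearch simplePrimeSearch_alt
  have hA := PySem.Dict.items_foldl_insert_fresh (PySem.List.pyRange 2 (n + 1) 1)
    (fun a => a) (fun a => pvTrial a 2) PySem.Dict.empty
    (by intro a _; simp) (by simpa using PySem.List.nodup_pyRange_one 2 (n + 1))
  rw [hA, PySem.List.foldl_append_singleton_eq_map]
  simp only [List.nil_append]
  refine List.map_congr_left ?_
  intro k hk
  rw [PySem.List.mem_pyRange_one] at hk
  exact congrArg _ (pointwise n k hk.1 hk.2)
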